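-- pv_equiv track=rewrite | github.com/SSAFY-while-true/se0hyun | 202503/202503_1/BOJ1309.py | make_lion_zoo
-- ===== SOURCE A (Python) =====
-- def make_lion_zoo(n):
--     dp = [0] * (n)
--     if n == 1:
--         return 3
--     elif n == 2:
--         return 7
--
--     dp[0], dp[1] = 3, 7
--
--     for i in range(2, n):
--         dp[i] = (2 * dp[i - 1] + dp[i - 2]) % 9901
--     return dp[i]
-- ===== SOURCE B (Python) =====
-- def make_lion_zoo(n):
--     # O(log n): binary exponentiation of the 2x2 recurrence matrix [[2,1],[1,0]] mod 9901.
--     if n == 1: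
--         return 3
--     if n == 2:
--         return 7
--
--     def mul(X, Y):
--         a, b, c, d = X
--         e, f, g, h = Y
--         return ((a * e + b * g) % 9901, (a * f + b * h) % 9901,
--                 (c * e + d * g) % 9901, (c * f + d * h) % 9901)
--
--     R = (1, 0, 0, 1)
--     M = (2, 1, 1, 0)
--     e = n - 2
--     while e:
--         if e & 1:
--             R = mul(R, M)
--         M = mul(M, M)
--         e >>= 1
--     return (R[0] * 7 + R[1] * 3) % 9901
-- ===== Notes on version B (the rewrite author's own statement) =====
-- stated objective: faster
-- what changed: Replaces the O(n) DP array recurrence with binary exponentiation of the 2x2 recurrence matrix [[2,1],[1,0]] mod 9901, computing the answer in O(log n) multiplications.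
import Mathlib
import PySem

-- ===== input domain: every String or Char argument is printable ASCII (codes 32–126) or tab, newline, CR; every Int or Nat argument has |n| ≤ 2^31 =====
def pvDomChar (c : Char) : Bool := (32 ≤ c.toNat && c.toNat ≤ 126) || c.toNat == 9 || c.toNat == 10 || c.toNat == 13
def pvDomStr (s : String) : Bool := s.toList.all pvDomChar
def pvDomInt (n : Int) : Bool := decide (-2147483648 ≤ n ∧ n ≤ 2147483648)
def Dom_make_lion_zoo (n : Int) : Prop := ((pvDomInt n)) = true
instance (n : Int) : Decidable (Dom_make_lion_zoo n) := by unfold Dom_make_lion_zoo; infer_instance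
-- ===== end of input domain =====

-- B replaces A's O(n) DP array with binary exponentiation of the 2x2 recurrence matrix mod 9901 (objective: faster).

-- ===== PORT A =====
-- dp = [0] * n; dp[0], dp[1] = 3, 7; for i in range(2, n): dp[i] = (2*dp[i-1] + dp[i-2]) % 9901; return dp[i]
-- (under Pre_ the loop is nonempty for n ≥ 3, so the leftover loop variable i equals n - 1)
def make_lion_zoo (n : Int) : Int :=
  if n = 1 then 3
  else if n = 2 then 7
  else
    let dp0 : List Int := ((List.replicate (max n 0).toNat (0 : Int)).set 0 3).set 1 7
    let dp := (PySem.List.pyRange 2 n 1).foldl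
      (fun dp i =>
        dp.set i.toNat
          (PySem.Int.mod (2 * PySem.List.pyGetD dp (i - 1) 0 + PySem.List.pyGetD dp (i - 2) 0) 9901))
      dp0
    PySem.List.pyGetD dp (n - 1) 0

-- ===== PORT B =====
-- Source B's mul(X, Y): 2x2 matrix product with each entry reduced mod 9901
def pvMulM (X Y : Int × Int × Int × Int) : Int × Int × Int × Int :=
  (PySem.Int.mod (X.1 * Y.1 + X.2.1 * Y.2.2.1) 9901,
   PySem.Int.mod (X.1 * Y.2.1 + X.2.1 * Y.2.2.2) 9901,
   PySem.Int.mod (X.2.2.1 * Y.1 + X.2.2.2 * Y.2.2.1) 9901,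
   PySem.Int.mod (X.2.2.1 * Y.2.1 + X.2.2.2 * Y.2.2.2) 9901)

-- Source B's 'while e:' binary-exponentiation loop (e & 1 ↔ e % 2 = 1; e >>= 1 ↔ e / 2)
def pvPowLoop (e : Nat) (R M : Int × Int × Int × Int) : Int × Int × Int × Int :=
  if e = 0 then R
  else pvPowLoop (e / 2) (if e % 2 = 1 then pvMulM R M else R) (pvMulM M M)
termination_by e
decreasing_by exact Nat.div_lt_self (Nat.pos_of_ne_zero (by assumption)) (by norm_num)

def make_lion_zoo_alt (n : Int) : Int :=
  if n = 1 then 3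
  else if n = 2 then 7
  else
    let R := pvPowLoop (n - 2).toNat (1, 0, 0, 1) (2, 1, 1, 0)
    PySem.Int.mod (R.1 * 7 + R.2.1 * 3) 9901

-- ===== PRECONDITION & SPEC =====
-- Pre_ excludes only n ≤ 0, where A raises IndexError ('dp[0], dp[1] = 3, 7' on a list shorter than 2).
def Pre_make_lion_zoo (n : Int) : Prop := 1 ≤ n
instance (n : Int) : Decidable (Pre_make_lion_zoo n) := by unfold Pre_make_lion_zoo; infer_instance
def pvWitness_make_lion_zoo : Int := 5

def Spec_make_lion_zoo (n : Int) (out : Int) : Prop := out = make_lion_zoo_alt n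
instance (n : Int) (out : Int) : Decidable (Spec_make_lion_zoo n out) := by unfold Spec_make_lion_zoo; infer_instance

-- ===== CLAIM (what is proved, stated in full; the proofs are below) =====
def Claim_equal_make_lion_zoo : Prop := ∀ (n : Int), Dom_make_lion_zoo n → Pre_make_lion_zoo n → Spec_make_lion_zoo n (make_lion_zoo n)

-- ===== LEMMAS AND PROOFS =====

-- reference sequence: g k = the answer for n = k + 1
def g : Nat → Int
  | 0 => 3
  | 1 => 7
  | (k+2) => (2 * g (k+1) + g k) % 9901

lemma g_bounds : ∀ k, 0 ≤ g k ∧ g k < 9901 := by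
  intro k
  match k with
  | 0 => simp [g]
  | 1 => simp [g]
  | (k+2) =>
      exact ⟨Int.emod_nonneg _ (by norm_num), Int.emod_lt_of_pos _ (by norm_num)⟩

-- ---- A side: the dp loop computes g ----

lemma loop_inv (f : List Int → Int → List Int)
    (hf : f = fun dp i =>
        dp.set i.toNat
          (PySem.Int.mod (2 * PySem.List.pyGetD dp (i - 1) 0 + PySem.List.pyGetD dp (i - 2) 0) 9901)) :
    ∀ (k : Nat) (dp : List Int), 2 + k ≤ dp.length →
      (∀ j : Nat, j < 2 → dp.getD j 0 = g j) →
      ((PySem.List.pyRange 2 (2 + (k : Int)) 1).foldl f dp).length = dp.length ∧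
      (∀ j : Nat, j < 2 + k → ((PySem.List.pyRange 2 (2 + (k : Int)) 1).foldl f dp).getD j 0 = g j) := by
  intro k
  induction k with
  | zero =>
    intro dp hlen hg2
    have : PySem.List.pyRange 2 (2 + ((0:Nat) : Int)) 1 = [] := by norm_num
    rw [this]
    exact ⟨rfl, fun j hj => hg2 j hj⟩
  | succ k ih =>
    intro dp hlen hg2
    have hcast : (2 + ((k + 1 : Nat) : Int)) = (2 + (k : Int)) + 1 := by push_cast; ring
    rw [hcast, PySem.List.pyRange_one_succ_right (by omega : (2:Int) ≤ 2 + (k:Int)),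
      List.foldl_append, List.foldl_cons, List.foldl_nil]
    obtain ⟨hlen', hval⟩ := ih dp (by omega) hg2
    set dp' := (PySem.List.pyRange 2 (2 + (k : Int)) 1).foldl f dp with hdp'
    have hi1 : (2 + (k : Int)) - 1 = ((k + 1 : Nat) : Int) := by push_cast; ring
    have hi2 : (2 + (k : Int)) - 2 = ((k : Nat) : Int) := by ring
    have hit : (2 + (k : Int)).toNat = 2 + k := by omega
    have hlt : 2 + k < dp'.length := by omega
    rw [hf]
    simp only [hi1, hi2, hit, PySem.List.pyGetD_natCast]
    rw [hval (k+1) (by omega), hval k (by omega)]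
    have hv : PySem.Int.mod (2 * g (k+1) + g k) 9901 = g (k+2) := by
      rw [PySem.Int.mod_eq_emod_of_pos (b := 9901) (by norm_num)]
      rfl
    rw [hv]
    refine ⟨by simpa using hlen', ?_⟩
    intro j hj
    by_cases hje : j = 2 + k
    · subst hje
      rw [List.getD_eq_getElem?_getD, List.getElem?_set_self hlt]
      show g (k + 2) = g (2 + k)
      rw [Nat.add_comm]
    · rw [List.getD_eq_getElem?_getD, List.getElem?_set_ne (by omega), ← List.getD_eq_getElem?_getD]
      exact hval j (by omega)

lemma make_lion_zoo_eq_g : ∀ n : Int, 1 ≤ n → make_lion_zoo n = g (n - 1).toNat := by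
  intro n h1
  by_cases hn1 : n = 1
  · simp [make_lion_zoo, hn1, g]
  by_cases hn2 : n = 2
  · simp [make_lion_zoo, hn2]
    decide
  have h3 : 3 ≤ n := by omega
  set k := (n - 2).toNat with hk
  have hn : n = 2 + (k : Int) := by omega
  set dp0 : List Int := ((List.replicate (max n 0).toNat (0 : Int)).set 0 3).set 1 7 with hdp0
  have hlen0 : dp0.length = n.toNat := by
    simp [hdp0]
    omega
  have hg2 : ∀ j : Nat, j < 2 → dp0.getD j 0 = g j := by
    intro j hj
    interval_cases j
    · rw [hdp0, List.getD_eq_getElem?_getD, List.getElem?_set_ne (by omega),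
        List.getElem?_set_self (by simp; omega)]
      rfl
    · rw [hdp0, List.getD_eq_getElem?_getD, List.getElem?_set_self (by simp; omega)]
      rfl
  obtain ⟨hlen, hval⟩ := loop_inv _ rfl k dp0 (by omega) hg2
  have hfin : make_lion_zoo n =
      PySem.List.pyGetD ((PySem.List.pyRange 2 (2 + (k : Int)) 1).foldl
        (fun dp i =>
          dp.set i.toNat
            (PySem.Int.mod (2 * PySem.List.pyGetD dp (i - 1) 0 + PySem.List.pyGetD dp (i - 2) 0) 9901))
        dp0) (n - 1) 0 := by
    rw [← hn]
    simp only [make_lion_zoo, if_neg hn1, if_neg hn2]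
    rw [← hdp0]
  rw [hfin, PySem.List.pyGetD_of_nonneg _ _ (by omega : (0:Int) ≤ n - 1)]
  exact hval (n - 1).toNat (by omega)

-- ---- B side: matrices over ZMod 9901 ----

def phi (X : Int × Int × Int × Int) : Matrix (Fin 2) (Fin 2) (ZMod 9901) :=
  !![(X.1 : ZMod 9901), (X.2.1 : ZMod 9901); (X.2.2.1 : ZMod 9901), (X.2.2.2 : ZMod 9901)]

lemma cast_emod (a : Int) : ((a % 9901 : Int) : ZMod 9901) = (a : ZMod 9901) := by
  rw [Int.emod_def]
  push_cast
  have : ((9901 : Int) : ZMod 9901) = 0 := by decide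
  push_cast at this
  rw [this]; ring

lemma cast_pymod (a : Int) : ((PySem.Int.mod a 9901 : Int) : ZMod 9901) = (a : ZMod 9901) := by
  rw [PySem.Int.mod_eq_emod_of_pos (b := 9901) (by norm_num)]; exact cast_emod a

lemma phi_mul (X Y : Int × Int × Int × Int) : phi (pvMulM X Y) = phi X * phi Y := by
  simp [phi, pvMulM, cast_emod]

lemma phi_pow : ∀ (e : Nat) (R M : Int × Int × Int × Int),
    phi (pvPowLoop e R M) = phi R * (phi M) ^ e := by
  intro e
  induction e using Nat.strong_induction_on with
  | _ e ih =>
    intro R M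
    rw [pvPowLoop]
    by_cases h : e = 0
    · simp [h]
    · simp only [h, if_false]
      rw [ih (e / 2) (Nat.div_lt_self (Nat.pos_of_ne_zero h) (by norm_num))]
      rw [phi_mul]
      by_cases h2 : e % 2 = 1
      · simp only [h2, if_true, phi_mul]
        rw [mul_assoc, ← pow_two, ← pow_mul, ← pow_succ']
        rw [show 2 * (e / 2) + 1 = e by omega]
      · have h0 : e % 2 = 0 := by omega
        simp only [h2, if_false]
        rw [← pow_two, ← pow_mul, show 2 * (e / 2) = e by omega]

lemma pow_entries (k : Nat) :
    ((phi (2,1,1,0)) ^ k) 0 0 * 7 + ((phi (2,1,1,0)) ^ k) 0 1 * 3 = ((g (k+1) : Int) : ZMod 9901) ∧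
    ((phi (2,1,1,0)) ^ k) 1 0 * 7 + ((phi (2,1,1,0)) ^ k) 1 1 * 3 = ((g k : Int) : ZMod 9901) := by
  induction k with
  | zero => simp [phi, g]
  | succ k ih =>
    rw [pow_succ']
    have h00 : (phi (2,1,1,0) * phi (2,1,1,0) ^ k) 0 0
        = 2 * ((phi (2,1,1,0)) ^ k) 0 0 + ((phi (2,1,1,0)) ^ k) 1 0 := by
      simp [phi, Matrix.mul_apply, Fin.sum_univ_two]
    have h01 : (phi (2,1,1,0) * phi (2,1,1,0) ^ k) 0 1
        = 2 * ((phi (2,1,1,0)) ^ k) 0 1 + ((phi (2,1,1,0)) ^ k) 1 1 := by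
      simp [phi, Matrix.mul_apply, Fin.sum_univ_two]
    have h10 : (phi (2,1,1,0) * phi (2,1,1,0) ^ k) 1 0 = ((phi (2,1,1,0)) ^ k) 0 0 := by
      simp [phi, Matrix.mul_apply, Fin.sum_univ_two]
    have h11 : (phi (2,1,1,0) * phi (2,1,1,0) ^ k) 1 1 = ((phi (2,1,1,0)) ^ k) 0 1 := by
      simp [phi, Matrix.mul_apply, Fin.sum_univ_two]
    rw [h00, h01, h10, h11]
    constructor
    · show _ = ((g (k+2) : Int) : ZMod 9901)
      rw [show g (k+2) = (2 * g (k+1) + g k) % 9901 from rfl, cast_emod]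
      push_cast
      linear_combination 2 * ih.1 + ih.2
    · exact ih.1

lemma phi_one : phi (1, 0, 0, 1) = 1 := by
  simp [phi, Matrix.one_fin_two]

lemma make_lion_zoo_alt_eq_g : ∀ n : Int, 1 ≤ n → make_lion_zoo_alt n = g (n - 1).toNat := by
  intro n h1
  by_cases hn1 : n = 1
  · simp [make_lion_zoo_alt, hn1, g]
  by_cases hn2 : n = 2
  · simp [make_lion_zoo_alt, hn2, g]
  have h3 : 3 ≤ n := by omega
  set e := (n - 2).toNat with he
  set R := pvPowLoop e (1, 0, 0, 1) (2, 1, 1, 0) with hR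
  have hout : make_lion_zoo_alt n = PySem.Int.mod (R.1 * 7 + R.2.1 * 3) 9901 := by
    rw [hR, he]
    simp only [make_lion_zoo_alt, if_neg hn1, if_neg hn2]
  have hphiR : phi R = (phi (2, 1, 1, 0)) ^ e := by
    rw [hR, phi_pow, phi_one, one_mul]
  have hcast : ((PySem.Int.mod (R.1 * 7 + R.2.1 * 3) 9901 : Int) : ZMod 9901)
      = ((g (e + 1) : Int) : ZMod 9901) := by
    rw [cast_pymod]
    have h00 : (phi R) 0 0 = ((R.1 : Int) : ZMod 9901) := by simp [phi]
    have h01 : (phi R) 0 1 = ((R.2.1 : Int) : ZMod 9901) := by simp [phi]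
    rw [← (pow_entries e).1, ← hphiR, h00, h01]
    push_cast
    ring
  have hmod : PySem.Int.mod (R.1 * 7 + R.2.1 * 3) 9901 % 9901 = g (e + 1) % 9901 :=
    (ZMod.intCast_eq_intCast_iff _ _ _).mp hcast
  have hb1 := PySem.Int.mod_nonneg (R.1 * 7 + R.2.1 * 3) (b := 9901) (by norm_num)
  have hb2 := PySem.Int.mod_lt (R.1 * 7 + R.2.1 * 3) (b := 9901) (by norm_num)
  have hg := g_bounds (e + 1)
  have hval : PySem.Int.mod (R.1 * 7 + R.2.1 * 3) 9901 = g (e + 1) := by omega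
  have hidx : e + 1 = (n - 1).toNat := by omega
  rw [hout, hval, hidx]

-- ===== VERDICT (by name: the statement is the Claim_ definition above) =====
theorem make_lion_zoo_spec : Claim_equal_make_lion_zoo := by
  intro n _ hpre
  unfold Spec_make_lion_zoo
  rw [make_lion_zoo_eq_g n hpre, make_lion_zoo_alt_eq_g n hpre]
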